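-- pv_equiv track=rewrite | github.com/bijux/bijux-pollenomics | src/bijux_pollen/data_downloader/collector.py | normalize_requested_sources
-- ===== SOURCE A (Python) =====
-- from typing import Iterable
--
-- AVAILABLE_SOURCES = ("aadr", "boundaries", "neotoma", "raa", "sead")
--
-- def normalize_requested_sources(sources: Iterable[str]) -> tuple[str, ...]:
--     """Normalize user-selected sources and expand `all`."""
--     requested = tuple(source.strip().casefold() for source in sources if source.strip())
--     if not requested:
--         raise ValueError("At least one data source is required")
--     if "all" in requested:
--         return AVAILABLE_SOURCES
--
--     unique_sources: list[str] = []
--     for source in requested: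
--         if source not in AVAILABLE_SOURCES:
--             raise ValueError(f"Unsupported data source: {source}")
--         if source not in unique_sources:
--             unique_sources.append(source)
--     return tuple(unique_sources)
-- ===== SOURCE B (Python) =====
-- AVAILABLE_SOURCES = ("aadr", "boundaries", "neotoma", "raa", "sead")
--
--
-- def normalize_requested_sources(sources):
--     """Normalize user-selected sources and expand `all`."""
--     requested = tuple(source.strip().casefold() for source in sources if source.strip())
--     if not requested:
--         raise ValueError("At least one data source is required")
--     if "all" in requested:
--         return AVAILABLE_SOURCES
--     for source in requested:
--         if source not in AVAILABLE_SOURCES: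
--             raise ValueError(f"Unsupported data source: {source}")
--
--     def dedup(items):
--         if not items:
--             return ()
--         head = items[0]
--         return (head,) + dedup(tuple(s for s in items[1:] if s != head))
--
--     return dedup(requested)
-- ===== Notes on version B (the rewrite author's own statement) =====
-- stated objective: alternative
-- what changed: A's single loop interleaving validation with a seen-list dedup is replaced by a separate validation pass followed by a recursive dedup that keeps the head and filters all later duplicates of it out of the tail, so no seen-container is maintained at all.
import Mathlib
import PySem

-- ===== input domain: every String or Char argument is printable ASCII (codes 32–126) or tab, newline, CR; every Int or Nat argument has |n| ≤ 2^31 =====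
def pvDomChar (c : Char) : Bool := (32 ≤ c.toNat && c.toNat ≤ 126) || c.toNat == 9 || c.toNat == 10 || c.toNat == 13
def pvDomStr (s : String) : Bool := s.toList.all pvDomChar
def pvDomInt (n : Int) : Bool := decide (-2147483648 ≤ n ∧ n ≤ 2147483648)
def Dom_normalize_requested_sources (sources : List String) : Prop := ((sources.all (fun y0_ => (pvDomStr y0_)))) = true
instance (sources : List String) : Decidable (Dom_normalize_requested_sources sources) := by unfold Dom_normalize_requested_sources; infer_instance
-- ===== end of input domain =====

-- B splits A's interleaved validate+dedup loop into a validation pass followed by a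
-- recursive head-keep/filter-tail dedup with no seen container (alternative; return value only).

-- ===== PORT A =====
def pvAvail : List String := ["aadr", "boundaries", "neotoma", "raa", "sead"]

-- `source.strip().casefold()` for `source in sources if source.strip()`; casefold = lower on
-- the printable-ASCII domain (exact there).
def pvReq (sources : List String) : List String :=
  (sources.filter (fun s => !(PySem.Str.strip s == ""))).map
    (fun s => PySem.Str.lower (PySem.Str.strip s))

-- A's for-loop: validate each source and append it to `unique_sources` if unseen;
-- the `raise ValueError` branch is modelled by returning [] (excluded by Pre_).
def pvALoop : List String → List String → List String
  | [], acc => acc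
  | s :: rest, acc =>
    if !(pvAvail.contains s) then []
    else if acc.contains s then pvALoop rest acc
    else pvALoop rest (acc ++ [s])

def normalize_requested_sources (sources : List String) : List String :=
  let requested := pvReq sources
  if requested = [] then []            -- raise ValueError (excluded by Pre_)
  else if requested.contains "all" then pvAvail
  else pvALoop requested []

-- ===== PORT B =====
-- B's `dedup`: keep the head, recurse on the tail with all copies of the head filtered out.
def pvFD : List String → List String
  | [] => []
  | x :: xs => x :: pvFD (xs.filter (fun y => !(y == x)))
termination_by l => l.length
decreasing_by
  simpa using (List.length_filter_le _ xs.attach).trans_eq (List.length_attach)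

def normalize_requested_sources_alt (sources : List String) : List String :=
  let requested := pvReq sources
  if requested = [] then []            -- raise ValueError (excluded by Pre_)
  else if requested.contains "all" then pvAvail
  else if requested.all (fun s => pvAvail.contains s)   -- validation pass (raise on failure)
  then pvFD requested                                    -- recursive filter-based dedup
  else []                                                -- raise ValueError (excluded by Pre_)

-- ===== PRECONDITION & SPEC =====
-- Pre_ excludes exactly the inputs where A raises ValueError: an empty normalized list, or
-- (absent "all") a normalized source outside AVAILABLE_SOURCES.
def Pre_normalize_requested_sources (sources : List String) : Prop :=
  pvReq sources ≠ [] ∧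
  ("all" ∈ pvReq sources ∨ ∀ s ∈ pvReq sources, s ∈ pvAvail)
instance (sources : List String) : Decidable (Pre_normalize_requested_sources sources) := by
  unfold Pre_normalize_requested_sources; infer_instance

def pvWitness_normalize_requested_sources : List String := [" AADR ", "sead", "aadr"]

def Spec_normalize_requested_sources (sources : List String) (out : List String) : Prop :=
  out = normalize_requested_sources_alt sources
instance (sources : List String) (out : List String) :
    Decidable (Spec_normalize_requested_sources sources out) := by
  unfold Spec_normalize_requested_sources; infer_instance

-- ===== CLAIM =====
def Claim_equal_normalize_requested_sources : Prop :=
  ∀ (sources : List String), Dom_normalize_requested_sources sources →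
    Pre_normalize_requested_sources sources →
    Spec_normalize_requested_sources sources (normalize_requested_sources sources)

-- ===== LEMMAS AND PROOFS =====
lemma pvALoop_eq_foldl (l : List String) (h : ∀ s ∈ l, s ∈ pvAvail) :
    ∀ acc, pvALoop l acc = l.foldl PySem.Set.add acc := by
  induction l with
  | nil => intro acc; simp [pvALoop]
  | cons s rest ih =>
    intro acc
    have hs : s ∈ pvAvail := h s List.mem_cons_self
    have hrest : ∀ t ∈ rest, t ∈ pvAvail := fun t ht => h t (List.mem_cons_of_mem _ ht)
    by_cases hmem : s ∈ acc
    · simp [pvALoop, hs, hmem, PySem.Set.add, ih hrest]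
    · simp [pvALoop, hs, hmem, PySem.Set.add, ih hrest]

lemma pvFD_nil : pvFD [] = [] := by simp [pvFD.eq_def]

lemma pvFD_cons (x : String) (xs : List String) :
    pvFD (x :: xs) = x :: pvFD (xs.filter (fun y => !(y == x))) := by
  conv_lhs => rw [pvFD.eq_def]

-- The seen-set foldl equals the head-keep/filter-tail dedup applied to the not-yet-seen part.
lemma foldl_add_eq_pvFD (l : List String) :
    ∀ acc, l.foldl PySem.Set.add acc = acc ++ pvFD (l.filter (fun y => !(acc.contains y))) := by
  induction l with
  | nil => intro acc; simp [pvFD_nil]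
  | cons x xs ih =>
    intro acc
    by_cases hmem : x ∈ acc
    · simp [List.foldl_cons, PySem.Set.add, ih acc, hmem]
    · have hadd : PySem.Set.add acc x = acc ++ [x] := by simp [PySem.Set.add, hmem]
      have hfilt : (xs.filter (fun y => !((acc ++ [x]).contains y)))
          = (xs.filter (fun y => !(acc.contains y))).filter (fun y => !(y == x)) := by
        rw [List.filter_filter]
        apply List.filter_congr
        intro y _
        by_cases hy : y = x
        · simp [hy, List.contains_eq_mem]
        · simp [hy, List.contains_eq_mem, hmem]
      rw [List.foldl_cons, hadd, ih (acc ++ [x]), hfilt]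
      simp [hmem, pvFD_cons, List.filter_filter]

-- ===== VERDICT =====
theorem normalize_requested_sources_spec : Claim_equal_normalize_requested_sources := by
  intro sources _ hpre
  unfold Spec_normalize_requested_sources
  unfold normalize_requested_sources normalize_requested_sources_alt
  obtain ⟨hne, hok⟩ := hpre
  by_cases hall : "all" ∈ pvReq sources
  · simp [hne, hall]
  · have hvalid : ∀ s ∈ pvReq sources, s ∈ pvAvail := by
      rcases hok with h | h
      · exact absurd h hall
      · exact h
    have h2 : ((pvReq sources).contains "all") = false := by simpa using hall
    have h3 : ((pvReq sources).all (fun s => pvAvail.contains s)) = true := by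
      simp only [List.all_eq_true, List.contains_eq_mem, decide_eq_true_eq]; exact hvalid
    simp only [if_neg hne, h2, Bool.false_eq_true, if_false, h3, if_true]
    rw [pvALoop_eq_foldl _ hvalid [], foldl_add_eq_pvFD]
    simp
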